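-- pv_equiv track=rewrite | github.com/feds201/feds-central | scouting/toolchains/csv_fixer.py | count_fields_in_header
-- ===== SOURCE A (Python) =====
-- def count_fields_in_header(content, delimiter):
--     """Count the number of fields in the header line"""
--     first_line = content.split('\n', 1)[0]
--     # Handle quoted fields properly
--     in_quote = False
--     field_count = 1  # Start with 1 because n delimiters = n+1 fields
--
--     for char in first_line:
--         if char == '"':
--             in_quote = not in_quote
--         elif char == delimiter and not in_quote:
--             field_count += 1
--
--     return field_count
-- ===== SOURCE B (Python) =====
-- def count_fields_in_header(content, delimiter):
--     """Count the number of fields in the header line"""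
--     first_line = content.split('\n', 1)[0]
--     # only a single-character delimiter can ever match a char of the line
--     if len(delimiter) != 1:
--         return 1
--     # segments between '"' characters: even-indexed ones lie outside quotes
--     return 1 + sum(seg.count(delimiter)
--                    for i, seg in enumerate(first_line.split('"'))
--                    if i % 2 == 0)
-- ===== Notes on version B (the rewrite author's own statement) =====
-- stated objective: faster
-- what changed: Replaces the per-character in_quote toggle loop with a split on '"' (even-indexed segments lie outside quotes) and a per-segment count of the delimiter, guarded by a single-character-delimiter check.
import Mathlib
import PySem

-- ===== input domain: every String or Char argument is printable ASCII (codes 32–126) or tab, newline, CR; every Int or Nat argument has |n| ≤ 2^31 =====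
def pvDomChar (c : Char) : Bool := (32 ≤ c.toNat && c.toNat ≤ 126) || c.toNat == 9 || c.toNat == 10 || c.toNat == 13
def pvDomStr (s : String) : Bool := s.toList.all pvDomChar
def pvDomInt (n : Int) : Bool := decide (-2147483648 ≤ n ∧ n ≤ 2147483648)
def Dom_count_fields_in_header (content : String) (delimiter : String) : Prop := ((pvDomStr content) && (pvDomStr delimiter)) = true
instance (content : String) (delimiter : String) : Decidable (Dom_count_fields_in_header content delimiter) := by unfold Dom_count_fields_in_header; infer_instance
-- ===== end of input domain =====

-- B replaces A's per-character in_quote toggle loop by splitting the line on '"'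
-- (even-indexed segments lie outside quotes) and counting the delimiter per segment:
-- an alternative decomposition of the same O(n) task.


-- ===== PORT A =====
-- A: first_line = content.split('\n', 1)[0]; then a fold over its characters with
-- state (in_quote, field_count); 'char == delimiter' compares the 1-char string of c
-- with the delimiter string, ported as [c] = delimiter.toList.
def count_fields_in_header (content : String) (delimiter : String) : Int :=
  let first_line : String := PySem.List.pyGetD ((PySem.Str.splitMax? content "\n" 1).getD []) 0 ""
  (first_line.toList.foldl
    (fun (st : Bool × Int) (c : Char) =>
      if c = '"' then (!st.1, st.2)
      else if [c] = delimiter.toList ∧ st.1 = false then (st.1, st.2 + 1)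
      else st)
    (false, 1)).2

-- ===== PORT B =====
-- B: same first line; a non-single-character delimiter never matches a char, so 1;
-- otherwise split on '"' (str.split with a one-char separator is List.splitOn on
-- code points — exact) and sum the delimiter counts of the even-indexed segments.
def count_fields_in_header_alt (content : String) (delimiter : String) : Int :=
  let first_line : String := PySem.List.pyGetD ((PySem.Str.splitMax? content "\n" 1).getD []) 0 ""
  if PySem.Str.len delimiter ≠ 1 then 1
  else
    1 + (((PySem.List.enumerate (first_line.toList.splitOn '"') 0).filter
            (fun p => PySem.Int.mod p.1 2 == 0)).map
          (fun p => (PySem.Chars.count p.2 delimiter.toList : Int))).sum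

-- ===== PRECONDITION & SPEC =====
def Spec_count_fields_in_header (content : String) (delimiter : String) (out : Int) : Prop := out = count_fields_in_header_alt content delimiter
instance (content : String) (delimiter : String) (out : Int) : Decidable (Spec_count_fields_in_header content delimiter out) := by unfold Spec_count_fields_in_header; infer_instance

-- ===== CLAIM (what is proved, stated in full; the proofs are below) =====
def Claim_equal_count_fields_in_header : Prop := ∀ (content : String) (delimiter : String), Dom_count_fields_in_header content delimiter → Spec_count_fields_in_header content delimiter (count_fields_in_header content delimiter)

-- ===== LEMMAS AND PROOFS =====

-- number of unquoted delimiter occurrences in a char list, following A's branch order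
def specCnt (dl : List Char) : Bool → List Char → Int
  | _, [] => 0
  | q, c :: t =>
    if c = '"' then specCnt dl (!q) t
    else if [c] = dl ∧ q = false then 1 + specCnt dl q t
    else specCnt dl q t

-- sum of the counts of d over the segments at even (b = false) positions
def sumAlt (d : Char) : Bool → List (List Char) → Int
  | _, [] => 0
  | b, s :: l => (if b then 0 else (s.count d : Int)) + sumAlt d (!b) l

theorem charsCount_single (d : Char) (cs : List Char) :
    PySem.Chars.count cs [d] = cs.count d := by
  show (if ([d] : List Char).isEmpty then cs.length + 1 else PySem.Chars.count.go [d] cs.length cs 0) = _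
  simp only [List.isEmpty_cons]
  suffices h : ∀ (fuel : Nat) (l : List Char) (acc : Nat), l.length ≤ fuel →
      PySem.Chars.count.go [d] fuel l acc = acc + l.count d by
    simpa using h cs.length cs 0 le_rfl
  intro fuel
  induction fuel with
  | zero => intro l acc h; interval_cases h' : l.length; simp_all [PySem.Chars.count.go]
  | succ f ih =>
    intro l acc h
    match l with
    | [] => simp [PySem.Chars.count.go]
    | c :: t =>
      simp only [PySem.Chars.count.go]
      by_cases hc : c = d
      · simp [List.isPrefixOf, hc, ih t (acc+1) (by simpa using Nat.lt_succ_iff.mp (by simpa using h))]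
        omega
      · simp [List.isPrefixOf, hc, Ne.symm hc, ih t acc (by simpa using Nat.lt_succ_iff.mp (by simpa using h))]

theorem enumSum_eq_sumAlt (d : Char) (segs : List (List Char)) : ∀ (k : Int),
    (((PySem.List.enumerate segs k).filter (fun p => PySem.Int.mod p.1 2 == 0)).map
        (fun p => (PySem.Chars.count p.2 [d] : Int))).sum
      = sumAlt d (PySem.Int.mod k 2 != 0) segs := by
  induction segs with
  | nil => intro k; simp [PySem.List.enumerate_nil, sumAlt]
  | cons s l ih =>
    intro k
    rw [PySem.List.enumerate_cons, List.filter_cons]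
    have hm : PySem.Int.mod k 2 = 0 ∨ PySem.Int.mod k 2 = 1 := by
      have h1 := PySem.Int.mod_nonneg k (b := 2) (by norm_num)
      have h2 := PySem.Int.mod_lt k (b := 2) (by norm_num)
      omega
    have hstep : PySem.Int.mod (k + 1) 2 = 1 - PySem.Int.mod k 2 := by
      have e1 := PySem.Int.mod_eq_emod_of_pos (a := k) (b := 2) (by norm_num)
      have e2 := PySem.Int.mod_eq_emod_of_pos (a := k + 1) (b := 2) (by norm_num)
      rw [e1, e2]; omega
    have hrec := ih (k + 1)
    rcases hm with hm | hm
    · have hb : (PySem.Int.mod (k, s).1 2 == 0) = true := by simp only [hm]; rfl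
      rw [hb]
      simp only [charsCount_single] at hrec ⊢
      simp only [if_true, List.map_cons, List.sum_cons]
      rw [hrec, hstep, hm]
      show (s.count d : Int) + sumAlt d true l = sumAlt d false (s :: l)
      simp [sumAlt]
    · have hb : (PySem.Int.mod (k, s).1 2 == 0) = false := by simp only [hm]; rfl
      rw [hb]
      simp only [charsCount_single] at hrec ⊢
      simp only [Bool.false_eq_true, if_false]
      rw [hrec, hstep, hm]
      show sumAlt d false l = sumAlt d true (s :: l)
      simp [sumAlt]

theorem foldlA_snd (dl : List Char) (cs : List Char) : ∀ (q : Bool) (n : Int),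
    (cs.foldl (fun (st : Bool × Int) (c : Char) =>
      if c = '"' then (!st.1, st.2)
      else if [c] = dl ∧ st.1 = false then (st.1, st.2 + 1)
      else st) (q, n)).2 = n + specCnt dl q cs := by
  induction cs with
  | nil => intro q n; simp [specCnt]
  | cons c t ih =>
    intro q n
    by_cases hq : c = '"'
    · simp [List.foldl_cons, hq, specCnt, ih]
    · by_cases hd : [c] = dl ∧ q = false
      · simp [List.foldl_cons, hq, hd, specCnt, ih]
        ring
      · simp [List.foldl_cons, hq, hd, specCnt, ih]

theorem specCnt_of_no_match (dl : List Char) (hno : ∀ c : Char, [c] ≠ dl) :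
    ∀ (cs : List Char) (q : Bool), specCnt dl q cs = 0 := by
  intro cs
  induction cs with
  | nil => intro q; simp [specCnt]
  | cons c t ih =>
    intro q
    by_cases hq : c = '"'
    · simp [specCnt, hq, ih]
    · simp [specCnt, hq, hno c, ih]

-- main bridge: per-segment counting over the even segments of splitOn '"' equals
-- the unquoted-occurrence count, proved for both parities at once
theorem sumAlt_splitOn (d : Char) (cs : List Char) :
    sumAlt d false (cs.splitOn '"') = specCnt [d] false cs
      ∧ sumAlt d true (cs.splitOn '"') = specCnt [d] true cs := by
  induction cs with
  | nil => simp [List.splitOn, List.splitOnP_nil, sumAlt, specCnt]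
  | cons c t ih =>
    obtain ⟨ih0, ih1⟩ := ih
    by_cases hq : c = '"'
    · subst hq
      have hsplit : (('"' : Char) :: t).splitOn '"' = [] :: t.splitOn '"' := by
        simp [List.splitOn, List.splitOnP_cons]
      refine ⟨?_, ?_⟩
      · rw [hsplit]; simpa [sumAlt, specCnt] using ih1
      · rw [hsplit]; simpa [sumAlt, specCnt] using ih0
    · obtain ⟨h, l, hl⟩ := List.exists_cons_of_ne_nil (List.splitOnP_ne_nil (· == '"') t)
      have hsplit : (c :: t).splitOn '"' = (c :: h) :: l := by
        simp [List.splitOn, List.splitOnP_cons, hq]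
        rw [show t.splitOnP (· == '"') = h :: l from hl]
        rfl
      have ht : t.splitOn '"' = h :: l := hl
      rw [ht] at ih0 ih1
      simp only [sumAlt] at ih0 ih1
      norm_num at ih0 ih1
      refine ⟨?_, ?_⟩
      · rw [hsplit]
        by_cases hd : c = d
        · subst hd
          simp [sumAlt, specCnt, hq, ← ih0]
          ring
        · simp [sumAlt, specCnt, hq, hd, ← ih0]
      · rw [hsplit]
        simp [sumAlt, specCnt, hq, ← ih1]

-- ===== VERDICT (by name: the statement is the Claim_ definition above) =====
theorem count_fields_in_header_spec : Claim_equal_count_fields_in_header := by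
  intro content delimiter _
  unfold Spec_count_fields_in_header count_fields_in_header count_fields_in_header_alt
  set fl : String := PySem.List.pyGetD ((PySem.Str.splitMax? content "\n" 1).getD []) 0 "" with hfl
  rw [foldlA_snd]
  by_cases hlen : PySem.Str.len delimiter ≠ 1
  · rw [if_pos hlen]
    have hno : ∀ c : Char, [c] ≠ delimiter.toList := by
      intro c hc
      apply hlen
      rw [PySem.Str.len_eq, ← hc]
      rfl
    rw [specCnt_of_no_match delimiter.toList hno]
    ring
  · obtain ⟨d, hd⟩ : ∃ d, delimiter.toList = [d] := by
      have hone : delimiter.toList.length = 1 := by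
        have := PySem.Str.len_eq delimiter
        omega
      match h : delimiter.toList with
      | [d] => exact ⟨d, rfl⟩
      | [] | _ :: _ :: _ => rw [h] at hone; simp at hone
    rw [if_neg hlen, hd]
    rw [enumSum_eq_sumAlt d (fl.toList.splitOn '"') 0]
    have h0 : (PySem.Int.mod 0 2 != 0) = false := by decide
    rw [h0, (sumAlt_splitOn d fl.toList).1]
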